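-- pv_equiv track=rewrite | github.com/alexbzg/cluster-collect | ham_radio.py | get_adif_field
-- ===== SOURCE A (Python) =====
-- def get_adif_field(line, field):
--     """reads ADIF field"""
--     i_head = line.find('<' + field + ':')
--     if i_head < 0:
--         return None
--     i_beg = line.find(">", i_head) + 1
--     ends = [x for x in [line.find(x, i_beg) for x in (' ', '<')] if x > -1]
--     i_end = min(ends) if ends else len(line)
--     return line[i_beg:i_end]
-- ===== SOURCE B (Python) =====
-- def get_adif_field(line, field):
--     """reads ADIF field"""
--     i_head = line.find('<' + field + ':')
--     if i_head < 0:
--         return None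
--     i_beg = line.find('>', i_head) + 1
--     i_end = next((j for j in range(i_beg, len(line)) if line[j] in ' <'),
--                  len(line))
--     return line[i_beg:i_end]
-- ===== Notes on version B (the rewrite author's own statement) =====
-- stated objective: simpler
-- what changed: A's two independent full find-scans for ' ' and '<' plus a filter/min combination are replaced by a single early-stopping scan from i_beg for the first terminator character; the header search and the '>'+1 computation are kept.
import Mathlib
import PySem

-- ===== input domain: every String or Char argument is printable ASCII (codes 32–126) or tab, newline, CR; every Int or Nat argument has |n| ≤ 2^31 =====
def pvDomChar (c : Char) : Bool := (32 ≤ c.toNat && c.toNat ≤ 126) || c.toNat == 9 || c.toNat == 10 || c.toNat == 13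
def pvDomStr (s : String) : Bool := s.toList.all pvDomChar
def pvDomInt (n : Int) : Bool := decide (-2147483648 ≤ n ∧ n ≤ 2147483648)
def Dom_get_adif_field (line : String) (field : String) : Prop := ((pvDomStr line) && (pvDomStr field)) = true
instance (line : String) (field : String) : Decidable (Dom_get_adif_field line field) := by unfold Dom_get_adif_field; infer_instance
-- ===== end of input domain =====

-- B replaces A's two independent full find-scans plus filter/min for the terminator by a
-- single early-stopping scan from i_beg for the first ' ' or '<' (objective: simpler).

-- ===== PORT A =====
def get_adif_field (line : String) (field : String) : Option String :=
  let i_head := PySem.Str.find line ("<" ++ field ++ ":")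
  if i_head < 0 then none
  else
    let i_beg := PySem.Str.findFrom line ">" i_head + 1
    let ends := ([PySem.Str.findFrom line " " i_beg,
                  PySem.Str.findFrom line "<" i_beg]).filter (fun x => decide (x > -1))
    let i_end := match PySem.List.min? ends id with
      | some m => m
      | none => PySem.Str.len line
    some (PySem.Str.slice line (some i_beg) (some i_end))

-- ===== PORT B =====
-- next((j for j in range(i_beg, len(line)) if line[j] in ' <'), len(line)):
-- scanning j from i_beg upward over line is findIdx? over line.toList.drop i_beg (i_beg ≥ 0 here).
def get_adif_field_alt (line : String) (field : String) : Option String :=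
  let i_head := PySem.Str.find line ("<" ++ field ++ ":")
  if i_head < 0 then none
  else
    let i_beg := PySem.Str.findFrom line ">" i_head + 1
    let i_end : Int :=
      match (line.toList.drop i_beg.toNat).findIdx? (fun c => c == ' ' || c == '<') with
      | some j => i_beg + (j : Int)
      | none => (line.toList.length : Int)
    some (PySem.Str.slice line (some i_beg) (some i_end))

-- ===== PRECONDITION & SPEC =====
def Spec_get_adif_field (line : String) (field : String) (out : Option String) : Prop := out = get_adif_field_alt line field
instance (line : String) (field : String) (out : Option String) : Decidable (Spec_get_adif_field line field out) := by unfold Spec_get_adif_field; infer_instance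

-- ===== CLAIM (what is proved, stated in full; the proofs are below) =====
def Claim_equal_get_adif_field : Prop := ∀ (line : String) (field : String), Dom_get_adif_field line field → Spec_get_adif_field line field (get_adif_field line field)

-- ===== LEMMAS AND PROOFS =====

/-- `[c]` is a prefix of `l` iff `l` starts with `c`. -/
lemma pv_singleton_prefix (c : Char) (l : List Char) : [c] <+: l ↔ l.head? = some c := by
  constructor
  · rintro ⟨t, rfl⟩; rfl
  · intro h
    cases l with
    | nil => simp at h
    | cons a t => simp at h; exact ⟨t, by simp [h]⟩

/-- `Chars.find` for a one-character needle is `findIdx?`. -/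
lemma pv_find_single (r : List Char) (c : Char) :
    PySem.Chars.find r [c] =
      (match r.findIdx? (fun x => x == c) with
       | some j => (j : Int)
       | none => -1) := by
  cases h : r.findIdx? (fun x => x == c) with
  | none =>
    have hmem : ∀ x ∈ r, ¬ x = c := by
      intro x hx
      have := (List.findIdx?_eq_none_iff.mp h) x hx
      simpa using this
    have : ¬ [c] <:+: r := by
      intro hinf
      exact hmem c ((List.singleton_infix_iff c r).mp hinf) rfl
    simpa using (PySem.Chars.find_eq_neg_one_iff r [c]).mpr this
  | some j =>
    obtain ⟨hj, hjc, hjmin⟩ := List.findIdx?_eq_some_iff_getElem.mp h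
    have hne : PySem.Chars.find r [c] ≠ -1 := by
      intro hno
      have hni := (PySem.Chars.find_eq_neg_one_iff r [c]).mp hno
      have hcr : c ∈ r := by
        have hm := r.getElem_mem hj
        rwa [show r[j] = c by simpa using hjc] at hm
      exact hni (((List.singleton_infix_iff c r)).mpr hcr)
    have hspec := PySem.Chars.findFrom_natCast_spec r [c] 0 (Nat.zero_le _)
    simp only [Nat.cast_zero, PySem.Chars.findFrom_zero] at hspec
    obtain ⟨h0, hpre, hmin⟩ := hspec hne
    set f := PySem.Chars.find r [c] with hf
    have hfc : r[f.toNat]? = some c := by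
      have := (pv_singleton_prefix c _).mp hpre
      simpa [List.head?_drop] using this
    have hflt : f.toNat < r.length := by
      by_contra hge
      simp [List.getElem?_eq_none (by omega : r.length ≤ f.toNat)] at hfc
    have hfcv : r[f.toNat] = c := by
      have := hfc; rwa [List.getElem?_eq_getElem hflt, Option.some_inj] at this
    have hjf : j = f.toNat := by
      rcases Nat.lt_trichotomy j f.toNat with hlt | heq | hgt
      · exfalso
        exact hmin j (Nat.zero_le _) hlt
          ((pv_singleton_prefix c _).mpr (by simp [List.head?_drop, List.getElem?_eq_getElem hj]; simpa using hjc))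
      · exact heq
      · exfalso
        have := hjmin f.toNat hgt
        simp [hfcv] at this
    subst hjf
    exact (Int.toNat_of_nonneg h0).symm

/-- Disjunction of two character tests: the first hit of either is the min of the two first hits. -/
lemma pv_findIdx_or (r : List Char) (c₁ c₂ : Char) :
    r.findIdx? (fun c => c == c₁ || c == c₂) =
      (match r.findIdx? (fun c => c == c₁), r.findIdx? (fun c => c == c₂) with
       | none, none => none
       | some a, none => some a
       | none, some b => some b
       | some a, some b => some (min a b)) := by
  induction r with
  | nil => simp
  | cons a t ih =>
    by_cases h1 : a = c₁
    · have hl : List.findIdx? (fun c => c == c₁ || c == c₂) (a :: t) = some 0 := by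
        simp [List.findIdx?_cons, h1]
      have hr : List.findIdx? (fun c => c == c₁) (a :: t) = some 0 := by
        simp [List.findIdx?_cons, h1]
      rw [hl, hr]
      cases List.findIdx? (fun c => c == c₂) (a :: t) <;> simp
    · by_cases h2 : a = c₂
      · have hl : List.findIdx? (fun c => c == c₁ || c == c₂) (a :: t) = some 0 := by
          simp [List.findIdx?_cons, h2]
        have hr2 : List.findIdx? (fun c => c == c₂) (a :: t) = some 0 := by
          simp [List.findIdx?_cons, h2]
        have hr1 : List.findIdx? (fun c => c == c₁) (a :: t)
            = Option.map (fun i => i + 1) (List.findIdx? (fun c => c == c₁) t) := by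
          simp [List.findIdx?_cons, h1]
        rw [hl, hr1, hr2]
        cases List.findIdx? (fun c => c == c₁) t <;> simp
      · have hl : List.findIdx? (fun c => c == c₁ || c == c₂) (a :: t)
            = Option.map (fun i => i + 1) (List.findIdx? (fun c => c == c₁ || c == c₂) t) := by
          simp [List.findIdx?_cons, h1, h2]
        have hr1 : List.findIdx? (fun c => c == c₁) (a :: t)
            = Option.map (fun i => i + 1) (List.findIdx? (fun c => c == c₁) t) := by
          simp [List.findIdx?_cons, h1]
        have hr2 : List.findIdx? (fun c => c == c₂) (a :: t)
            = Option.map (fun i => i + 1) (List.findIdx? (fun c => c == c₂) t) := by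
          simp [List.findIdx?_cons, h2]
        rw [hl, hr1, hr2, ih]
        cases List.findIdx? (fun c => c == c₁) t <;>
          cases List.findIdx? (fun c => c == c₂) t <;> simp

/-- Bounds for a successful `findFrom` with a nonempty needle. -/
lemma pv_findFrom_bounds (cs sub : List Char) (hsub : sub ≠ []) (k : Nat) (hk : k ≤ cs.length)
    (h : PySem.Chars.findFrom cs sub (k : Int) ≠ -1) :
    (k : Int) ≤ PySem.Chars.findFrom cs sub (k : Int) ∧
      (PySem.Chars.findFrom cs sub (k : Int)).toNat < cs.length := by
  obtain ⟨h0, hpre, -⟩ := PySem.Chars.findFrom_natCast_spec cs sub k hk h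
  refine ⟨h0, ?_⟩
  by_contra hge
  rw [List.drop_eq_nil_of_le (by omega)] at hpre
  exact hsub (List.prefix_nil.mp hpre)

/-- The terminator index computed A's way (two finds, filter, min) equals B's single scan. -/
lemma pv_i_end_eq (cs : List Char) (kb : Nat) (hkb : kb ≤ cs.length) :
    (match PySem.List.min?
        (([PySem.Chars.findFrom cs [' '] (kb : Int),
           PySem.Chars.findFrom cs ['<'] (kb : Int)]).filter (fun x => decide (x > -1))) id with
     | some m => m
     | none => (cs.length : Int))
    = (match (cs.drop kb).findIdx? (fun c => c == ' ' || c == '<') with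
       | some j => (kb : Int) + (j : Int)
       | none => (cs.length : Int)) := by
  rw [PySem.Chars.findFrom_natCast cs [' '] kb hkb, PySem.Chars.findFrom_natCast cs ['<'] kb hkb]
  rw [pv_find_single (cs.drop kb) ' ', pv_find_single (cs.drop kb) '<', pv_findIdx_or]
  cases h1 : (cs.drop kb).findIdx? (fun c => c == ' ') with
  | none =>
    cases h2 : (cs.drop kb).findIdx? (fun c => c == '<') with
    | none => simp [PySem.List.min?]
    | some b =>
      rw [if_pos rfl, if_neg (by omega : ¬(((b : Nat) : Int) = -1))]
      have e2pos : (decide (((kb : Int) + (b : Nat)) > -1)) = true := by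
        simp only [decide_eq_true_eq]; omega
      simp [PySem.List.min?, List.filter, e2pos]
  | some a =>
    cases h2 : (cs.drop kb).findIdx? (fun c => c == '<') with
    | none =>
      rw [if_neg (by omega : ¬(((a : Nat) : Int) = -1)), if_pos rfl]
      have e1pos : (decide (((kb : Int) + (a : Nat)) > -1)) = true := by
        simp only [decide_eq_true_eq]; omega
      simp [PySem.List.min?, List.filter, e1pos]
    | some b =>
      rw [if_neg (by omega : ¬(((a : Nat) : Int) = -1)),
          if_neg (by omega : ¬(((b : Nat) : Int) = -1))]
      have e1pos : (decide (((kb : Int) + (a : Nat)) > -1)) = true := by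
        simp only [decide_eq_true_eq]; omega
      have e2pos : (decide (((kb : Int) + (b : Nat)) > -1)) = true := by
        simp only [decide_eq_true_eq]; omega
      simp only [PySem.List.min?, List.filter, e1pos, e2pos, List.foldl, id]
      simp only [Nat.min_def]
      split_ifs <;> dsimp only <;> omega

-- ===== VERDICT (by name: the statement is the Claim_ definition above) =====
theorem get_adif_field_spec : Claim_equal_get_adif_field := by
  intro line field _
  unfold Spec_get_adif_field get_adif_field get_adif_field_alt
  simp only [PySem.Str.find_eq, PySem.Str.findFrom_eq, PySem.Str.len]
  set cs := line.toList with hcs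
  set ih := PySem.Chars.find cs ("<" ++ field ++ ":").toList with hih
  by_cases h : ih < 0
  · simp [h]
  · simp only [h, if_false]
    -- i_beg is in [0, cs.length]
    set b := PySem.Chars.findFrom cs ">".toList ih + 1 with hb
    have hbb : 0 ≤ b ∧ b.toNat ≤ cs.length := by
      by_cases hgt : PySem.Chars.findFrom cs ">".toList ih = -1
      · rw [hb, hgt]; simp
      · -- ih is a valid index returned by find, so 0 ≤ ih and ih.toNat ≤ cs.length
        have hihne : ih ≠ -1 := by omega
        have hih0 : 0 ≤ ih := by omega
        have hihlt : ih.toNat < cs.length := by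
          have := pv_findFrom_bounds cs ("<" ++ field ++ ":").toList
            (by simp [String.toList_append]) 0 (Nat.zero_le _)
          simp only [Nat.cast_zero, PySem.Chars.findFrom_zero, ← hih] at this
          exact (this hihne).2
        have hcast : ih = ((ih.toNat : Nat) : Int) := by omega
        rw [hcast] at hgt hb
        have := pv_findFrom_bounds cs ">".toList (by decide) ih.toNat (by omega) hgt
        constructor <;> omega
    have hbcast : b = ((b.toNat : Nat) : Int) := by omega
    rw [hbcast]
    have := pv_i_end_eq cs b.toNat hbb.2
    simp only [show (" ".toList = [' ']) from rfl, show ("<".toList = ['<']) from rfl] at this ⊢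
    rw [Int.toNat_natCast]
    rw [this]
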